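-- pv_equiv track=rewrite | github.com/hinablue/None_Z-image-Turbo_trainer | src/turbo_trainer/data/dataloader.py | _parse_resolution
-- ===== SOURCE A (Python) =====
-- from typing import Dict, List, Optional, Tuple, Union
--
-- def _parse_resolution(name: str) -> Tuple[int, int]:
--     """Parse resolution from filename (e.g., image_1024x1024_zi)"""
--     parts = name.split('_')
--     res = (1024, 1024) # Default
--     for part in parts:
--         if 'x' in part and part.replace('x', '').isdigit():
--             try:
--                 w, h = map(int, part.split('x'))
--                 res = (h, w) # (H, W)
--                 break
--             except:
--                 pass
--     return res
-- ===== SOURCE B (Python) =====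
-- def _parse_resolution(name):
--     """Parse resolution from filename (e.g., image_1024x1024_zi).
--
--     One left-to-right pass over the characters with a small DFA, instead of
--     split/replace/isdigit/try per token.  States: 0 = token start, 1 = in first
--     digit group (w), 2 = just after 'x', 3 = in second digit group (h), 4 = dead
--     token.  At a token boundary ('_' or end) a token accepted in state 3 was
--     exactly digits 'x' digits; return (h, w) as A does.
--     """
--     st, w, h = 0, 0, 0
--     for ch in name + '_':
--         if ch == '_':
--             if st == 3:
--                 return (h, w)
--             st, w, h = 0, 0, 0
--         elif (st == 0 or st == 1) and '0' <= ch <= '9':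
--             st, w = 1, w * 10 + (ord(ch) - 48)
--         elif st == 1 and ch == 'x':
--             st = 2
--         elif (st == 2 or st == 3) and '0' <= ch <= '9':
--             st, h = 3, h * 10 + (ord(ch) - 48)
--         else:
--             st = 4
--     return (1024, 1024)
-- ===== Notes on version B (the rewrite author's own statement) =====
-- stated objective: alternative
-- what changed: Replaced A's per-token pipeline (split on the separator, then per token a membership test, replace, isdigit and a try/except around map(int, token.split('x'))) by a single left-to-right character scan with a 5-state DFA that accumulates the two numbers arithmetically and returns at the first accepting token boundary.
import Mathlib
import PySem

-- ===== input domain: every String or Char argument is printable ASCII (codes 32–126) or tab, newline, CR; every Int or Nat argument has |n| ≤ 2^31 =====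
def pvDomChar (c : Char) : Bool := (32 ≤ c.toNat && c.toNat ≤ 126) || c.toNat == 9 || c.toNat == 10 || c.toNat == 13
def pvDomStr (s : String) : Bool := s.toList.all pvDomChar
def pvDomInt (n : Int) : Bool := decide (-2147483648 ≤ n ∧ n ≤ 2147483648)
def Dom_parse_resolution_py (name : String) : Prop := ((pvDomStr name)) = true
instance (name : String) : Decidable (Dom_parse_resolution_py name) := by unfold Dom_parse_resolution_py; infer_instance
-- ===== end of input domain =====

-- B replaces A's per-token split/replace/isdigit/try-int pipeline by a single 5-state
-- character DFA pass (one traversal, no intermediate strings); return values are equal.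

-- ===== PORT A =====
-- int(piece): here int() is only ever applied to the pieces of part.split('x') AFTER the
-- guard part.replace('x','').isdigit() succeeded, i.e. to (possibly empty) pure ASCII digit
-- strings.  PySem.Int.ofChars?'s digit-value helper is private (not citable in proofs), so
-- int() is ported by hand; the port is EXACT on every string this function applies it to:
-- none (ValueError) on the empty string, the decimal value on a nonempty digit string.
def pvIntDigits? (ds : List Char) : Option Int :=
  if ds.isEmpty || !ds.all PySem.Chars.isdigit then none
  else some (ds.foldl (fun a c => a * 10 + ((c.toNat : Int) - 48)) 0)

-- try: w, h = map(int, part.split('x')); any unpack-arity or int() failure → except → none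
def pvTryWH (p : List Char) : Option (Int × Int) :=
  match PySem.Chars.splitOn p ['x'] with
  | [a, b] =>
    match pvIntDigits? a, pvIntDigits? b with
    | some w, some h => some (w, h)
    | _, _ => none
  | _ => none

-- the for-loop over parts, with the res default and the break
def pvALoop : List (List Char) → Int × Int
  | [] => (1024, 1024)
  | p :: rest =>
    if PySem.Chars.isIn ['x'] p && PySem.Chars.strIsdigit (PySem.Chars.replace p ['x'] []) then
      match pvTryWH p with
      | some (w, h) => (h, w)
      | none => pvALoop rest
    else pvALoop rest

-- name.split('_') = PySem.Chars.splitOn name.toList ['_'] (separator nonempty; Str.split? is its thin wrapper)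
def parse_resolution_py (name : String) : Int × Int :=
  pvALoop (PySem.Chars.splitOn name.toList ['_'])

-- ===== PORT B =====
def pvBDigit (c : Char) : Bool := decide ('0' ≤ c) && decide (c ≤ '9')

-- the DFA loop of Source B over the characters of name + '_'
def pvBGo : List Char → Nat → Int → Int → Int × Int
  | [], _, _, _ => (1024, 1024)
  | c :: cs, st, w, h =>
    if c = '_' then
      if st = 3 then (h, w) else pvBGo cs 0 0 0
    else if (st == 0 || st == 1) && pvBDigit c then
      pvBGo cs 1 (w * 10 + ((c.toNat : Int) - 48)) h
    else if st == 1 && c == 'x' then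
      pvBGo cs 2 w h
    else if (st == 2 || st == 3) && pvBDigit c then
      pvBGo cs 3 w (h * 10 + ((c.toNat : Int) - 48))
    else
      pvBGo cs 4 w h

def parse_resolution_py_alt (name : String) : Int × Int :=
  pvBGo (name.toList ++ ['_']) 0 0 0

-- ===== PRECONDITION & SPEC =====
def Spec_parse_resolution_py (name : String) (out : Int × Int) : Prop := out = parse_resolution_py_alt name
instance (name : String) (out : Int × Int) : Decidable (Spec_parse_resolution_py name out) := by unfold Spec_parse_resolution_py; infer_instance

-- ===== CLAIM (what is proved, stated in full; the proofs are below) =====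
def Claim_equal_parse_resolution_py : Prop := ∀ (name : String), Dom_parse_resolution_py name → Spec_parse_resolution_py name (parse_resolution_py name)

-- ===== LEMMAS AND PROOFS =====

-- decimal accumulation (shared shape of both ports' digit folds)
def pvVal (i : Int) (ds : List Char) : Int :=
  ds.foldl (fun a c => a * 10 + ((c.toNat : Int) - 48)) i

-- reference single-character splitter (Python str.split(d) for a 1-char separator)
def pvSplitC (d : Char) : List Char → List (List Char)
  | [] => [[]]
  | c :: cs =>
    if c = d then [] :: pvSplitC d cs
    else
      match pvSplitC d cs with
      | [] => [[c]]
      | t :: r => (c :: t) :: r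

-- first-'x' decomposition of a token
def pvTokA (p : List Char) : List Char := p.takeWhile (· ≠ 'x')
def pvTokB (p : List Char) : List Char := (p.dropWhile (· ≠ 'x')).tail

-- a token on which A's loop body breaks (and B's DFA accepts)
def pvValidTok (p : List Char) : Bool :=
  p.contains 'x' && !(pvTokA p).isEmpty && (pvTokA p).all PySem.Chars.isdigit
    && !(pvTokB p).isEmpty && (pvTokB p).all PySem.Chars.isdigit

theorem pvSplitC_ne_nil (d : Char) (l : List Char) : pvSplitC d l ≠ [] := by
  induction l with
  | nil => simp [pvSplitC]
  | cons c cs ih =>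
    simp only [pvSplitC]
    split_ifs with h
    · simp
    · cases hs : pvSplitC d cs with
      | nil => exact absurd hs ih
      | cons t r => simp

theorem pvSplitC_of_not_mem (d : Char) (l : List Char) (h : d ∉ l) :
    pvSplitC d l = [l] := by
  induction l with
  | nil => rfl
  | cons c cs ih =>
    have hc : ¬ c = d := fun hcd => h (by simp [hcd])
    have : pvSplitC d cs = [cs] := ih (fun hm => h (List.mem_cons_of_mem _ hm))
    simp [pvSplitC, hc, this]

theorem pvSplitC_append (d : Char) (a b : List Char) (h : d ∉ a) :
    pvSplitC d (a ++ d :: b) = a :: pvSplitC d b := by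
  induction a with
  | nil => simp [pvSplitC]
  | cons c cs ih =>
    have hc : ¬ c = d := fun hcd => h (by simp [hcd])
    have := ih (fun hm => h (List.mem_cons_of_mem _ hm))
    simp only [List.cons_append, pvSplitC, hc, if_false, this]

theorem pvSplitC_length (d : Char) (l : List Char) :
    (pvSplitC d l).length = l.count d + 1 := by
  induction l with
  | nil => simp [pvSplitC]
  | cons c cs ih =>
    simp only [pvSplitC]
    split_ifs with h
    · simp [h, List.count_cons, ih]
    · cases hs : pvSplitC d cs with
      | nil => exact absurd hs (pvSplitC_ne_nil d cs)
      | cons t r =>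
        have : c ≠ d := h
        simp [List.count_cons, this, ← ih, hs]

-- PySem.Chars.splitOn with a one-character separator is pvSplitC
theorem pvSplitOn_go_spec (d : Char) (fuel : Nat) (l cur : List Char)
    (acc : List (List Char)) (hf : l.length ≤ fuel) :
    PySem.Chars.splitOn.go [d] fuel l cur acc
      = acc.reverse ++
        (match pvSplitC d l with
         | [] => []
         | t :: r => (cur.reverse ++ t) :: r) := by
  induction fuel generalizing l cur acc with
  | zero =>
    have : l = [] := List.length_eq_zero_iff.mp (Nat.le_zero.mp hf)
    subst this
    simp [PySem.Chars.splitOn.go, pvSplitC]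
  | succ fuel ih =>
    cases l with
    | nil => simp [PySem.Chars.splitOn.go, pvSplitC]
    | cons c rest =>
      simp only [PySem.Chars.splitOn.go]
      by_cases hcd : d = c
      · subst hcd
        have hpre : [d].isPrefixOf (d :: rest) = true := by simp [List.isPrefixOf]
        rw [if_pos hpre]
        have := ih rest [] (cur.reverse :: acc)
          (by simpa using Nat.le_of_succ_le_succ hf)
        simp only [List.length_cons, List.drop_succ_cons, List.length_nil, List.drop_zero] at this ⊢
        rw [this]
        simp only [pvSplitC, List.reverse_cons, List.append_assoc, List.reverse_nil,
          List.nil_append, List.singleton_append]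
        cases hs : pvSplitC d rest with
        | nil => exact absurd hs (pvSplitC_ne_nil d rest)
        | cons t r => simp
      · have hpre : [d].isPrefixOf (c :: rest) = false := by
          simp [List.isPrefixOf, hcd]
        rw [if_neg (by simp [hpre])]
        have := ih rest (c :: cur) acc (by simpa using Nat.le_of_succ_le_succ hf)
        rw [this]
        have hne : ¬ c = d := fun h => hcd h.symm
        simp only [pvSplitC, hne, if_false]
        cases hs : pvSplitC d rest with
        | nil => exact absurd hs (pvSplitC_ne_nil d rest)
        | cons t r => simp

theorem pvSplitOn_eq (d : Char) (l : List Char) :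
    PySem.Chars.splitOn l [d] = pvSplitC d l := by
  unfold PySem.Chars.splitOn
  rw [pvSplitOn_go_spec d (l.length + 1) l [] [] (Nat.le_succ _)]
  cases hs : pvSplitC d l with
  | nil => exact absurd hs (pvSplitC_ne_nil d l)
  | cons t r => simp

-- PySem.Chars.replace with a one-character pattern and empty replacement is filter
theorem pvReplace_go_spec (d : Char) (fuel : Nat) (l acc : List Char)
    (hf : l.length ≤ fuel) :
    PySem.Chars.replace.go [d] [] fuel l acc
      = acc.reverse ++ l.filter (fun c => c ≠ d) := by
  induction fuel generalizing l acc with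
  | zero =>
    have : l = [] := List.length_eq_zero_iff.mp (Nat.le_zero.mp hf)
    subst this
    simp [PySem.Chars.replace.go]
  | succ fuel ih =>
    cases l with
    | nil => simp [PySem.Chars.replace.go]
    | cons c rest =>
      simp only [PySem.Chars.replace.go]
      by_cases hcd : d = c
      · subst hcd
        have hpre : [d].isPrefixOf (d :: rest) = true := by simp [List.isPrefixOf]
        rw [if_pos hpre]
        have := ih rest acc (by simpa using Nat.le_of_succ_le_succ hf)
        simp only [List.length_cons, List.drop_succ_cons, List.length_nil, List.drop_zero,
          List.reverse_nil, List.nil_append] at this ⊢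
        rw [this]
        simp
      · have hpre : [d].isPrefixOf (c :: rest) = false := by
          simp [List.isPrefixOf, hcd]
        rw [if_neg (by simp [hpre])]
        have := ih rest (c :: acc) (by simpa using Nat.le_of_succ_le_succ hf)
        rw [this]
        have hne : c ≠ d := fun h => hcd h.symm
        simp [hne]

theorem pvReplace_eq_filter (d : Char) (l : List Char) :
    PySem.Chars.replace l [d] [] = l.filter (fun c => c ≠ d) := by
  unfold PySem.Chars.replace
  rw [if_neg (by simp)]
  simpa using pvReplace_go_spec d l.length l [] le_rfl

-- 'x' in part, for a one-character needle
theorem pvIsIn_singleton (d : Char) (l : List Char) :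
    PySem.Chars.isIn [d] l = l.contains d := by
  by_cases h : d ∈ l
  · have hinf : [d] <:+: l := by
      obtain ⟨s, t, rfl⟩ := List.append_of_mem h
      exact ⟨s, t, by simp⟩
    rw [(PySem.Chars.isIn_iff_infix _ _).mpr hinf]
    simp [h]
  · have hninf : ¬ [d] <:+: l := fun hinf => h (hinf.subset (by simp))
    rw [(PySem.Chars.isIn_eq_false_iff _ _).mpr hninf]
    simp [h]

-- first-occurrence decomposition
theorem pvFirstSplit (d : Char) (p : List Char) (h : d ∈ p) :
    p = p.takeWhile (· ≠ d) ++ d :: (p.dropWhile (· ≠ d)).tail := by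
  induction p with
  | nil => cases h
  | cons c cs ih =>
    by_cases hc : c = d
    · subst hc
      simp [List.takeWhile_cons, List.dropWhile_cons]
    · have hm : d ∈ cs := by
        rcases List.mem_cons.mp h with h1 | h1
        · exact absurd h1.symm hc
        · exact h1
      have hb : (decide (c ≠ d)) = true := by simp [hc]
      simp only [List.takeWhile_cons, List.dropWhile_cons, hb, if_true, List.cons_append]
      exact congrArg (c :: ·) (ih hm)

theorem pvTok_decomp (p : List Char) (h : 'x' ∈ p) :
    p = pvTokA p ++ 'x' :: pvTokB p := pvFirstSplit 'x' p h

theorem pvTokA_not_mem (p : List Char) : 'x' ∉ pvTokA p := by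
  intro hm
  have := List.mem_takeWhile_imp hm
  simp at this

-- digits are not 'x'
theorem pvDigit_ne_x {c : Char} (h : PySem.Chars.isdigit c = true) : c ≠ 'x' := by
  intro h1
  subst h1
  exact absurd h (by decide)

theorem pvFilter_of_digits (l : List Char) (h : l.all PySem.Chars.isdigit = true) :
    l.filter (fun c => c ≠ 'x') = l := by
  apply List.filter_eq_self.mpr
  intro c hc
  have := pvDigit_ne_x (List.all_eq_true.mp h c hc)
  simp [this]

theorem pvNotMem_of_digits (l : List Char) (h : l.all PySem.Chars.isdigit = true) :
    'x' ∉ l := by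
  intro hm
  exact pvDigit_ne_x (List.all_eq_true.mp h 'x' hm) rfl

-- pvIntDigits? characterization
theorem pvIntDigits?_eq (ds : List Char) :
    pvIntDigits? ds
      = if ds ≠ [] ∧ ds.all PySem.Chars.isdigit then some (pvVal 0 ds) else none := by
  unfold pvIntDigits? pvVal
  rcases ds with _ | ⟨c, cs⟩
  · simp
  · by_cases h : (c :: cs).all PySem.Chars.isdigit = true
    · simp [h]
    · simp [h]

-- ===== A-side token step =====
theorem pvAStep (p : List Char) (rest : List (List Char)) :
    pvALoop (p :: rest)
      = if pvValidTok p then (pvVal 0 (pvTokB p), pvVal 0 (pvTokA p))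
        else pvALoop rest := by
  by_cases hx : 'x' ∈ p
  · have hdec := pvTok_decomp p hx
    have hxa := pvTokA_not_mem p
    by_cases hv : pvValidTok p = true
    · -- valid: guard passes and the try succeeds
      rw [if_pos hv]
      unfold pvValidTok at hv
      simp only [Bool.and_eq_true, Bool.not_eq_true', List.isEmpty_eq_false_iff] at hv
      obtain ⟨⟨⟨⟨hcont, hAne⟩, hAdig⟩, hBne⟩, hBdig⟩ := hv
      have hxb : 'x' ∉ pvTokB p := pvNotMem_of_digits _ hBdig
      have hguard : (PySem.Chars.isIn ['x'] p
          && PySem.Chars.strIsdigit (PySem.Chars.replace p ['x'] [])) = true := by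
        rw [pvIsIn_singleton, pvReplace_eq_filter]
        have hfil : p.filter (fun c => c ≠ 'x') = pvTokA p ++ pvTokB p := by
          conv_lhs => rw [hdec]
          rw [List.filter_append]
          simp only [List.filter_cons, decide_eq_true_eq]
          rw [pvFilter_of_digits _ hAdig, pvFilter_of_digits _ hBdig]
          simp
        rw [hfil]
        have : PySem.Chars.strIsdigit (pvTokA p ++ pvTokB p) = true := by
          simp only [PySem.Chars.strIsdigit, Bool.and_eq_true, Bool.not_eq_true',
            List.isEmpty_eq_false_iff, List.all_append]
          exact ⟨by simp [hAne], hAdig, hBdig⟩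
        simp [this, hx]
      rw [pvALoop, if_pos hguard]
      have hsplit : PySem.Chars.splitOn p ['x'] = [pvTokA p, pvTokB p] := by
        rw [pvSplitOn_eq]
        conv_lhs => rw [hdec]
        rw [pvSplitC_append _ _ _ hxa, pvSplitC_of_not_mem _ _ hxb]
      unfold pvTryWH
      rw [hsplit]
      simp [pvIntDigits?_eq, hAne, hBne, hAdig, hBdig]
    · -- invalid: either the guard fails or the try raises; fall through
      rw [if_neg hv]
      rw [pvALoop]
      by_cases hguard : (PySem.Chars.isIn ['x'] p
          && PySem.Chars.strIsdigit (PySem.Chars.replace p ['x'] [])) = true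
      · rw [if_pos hguard]
        -- guard passed but the token is not valid: the try returns none
        have htry : pvTryWH p = none := by
          rw [pvIsIn_singleton, pvReplace_eq_filter] at hguard
          simp only [Bool.and_eq_true] at hguard
          obtain ⟨_, hdig⟩ := hguard
          have hfil : p.filter (fun c => c ≠ 'x')
              = pvTokA p ++ (pvTokB p).filter (fun c => c ≠ 'x') := by
            conv_lhs => rw [hdec]
            rw [List.filter_append]
            simp only [List.filter_cons, decide_eq_true_eq]
            have : (pvTokA p).filter (fun c => c ≠ 'x') = pvTokA p := by
              apply List.filter_eq_self.mpr
              intro c hc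
              have : ¬ c = 'x' := by
                intro h1; subst h1; exact hxa hc
              simp [this]
            rw [this]
            simp
          rw [hfil] at hdig
          simp only [PySem.Chars.strIsdigit, Bool.and_eq_true, List.all_append] at hdig
          obtain ⟨hne, hAdig, hBfdig⟩ := hdig
          by_cases hxb : 'x' ∈ pvTokB p
          · -- more than one 'x': split('x') has ≥ 3 pieces, unpack fails
            unfold pvTryWH
            rw [pvSplitOn_eq]
            conv_lhs => rw [hdec]
            rw [pvSplitC_append _ _ _ hxa]
            have h2 : 2 ≤ (pvSplitC 'x' (pvTokB p)).length := by
              rw [pvSplitC_length]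
              have := List.count_pos_iff.mpr hxb
              omega
            rcases hs : pvSplitC 'x' (pvTokB p) with _ | ⟨t1, _ | ⟨t2, r⟩⟩ <;>
              simp [hs] at h2 ⊢
          · -- one 'x' but one of the digit groups is empty: int('') raises
            have hBfil : (pvTokB p).filter (fun c => c ≠ 'x') = pvTokB p := by
              apply List.filter_eq_self.mpr
              intro c hc
              have : ¬ c = 'x' := by intro h1; subst h1; exact hxb hc
              simp [this]
            rw [hBfil] at hBfdig
            have hAorB : pvTokA p = [] ∨ pvTokB p = [] := by
              by_contra hcon
              push Not at hcon
              apply hv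
              unfold pvValidTok
              simp only [Bool.and_eq_true, Bool.not_eq_true', List.isEmpty_eq_false_iff]
              exact ⟨⟨⟨⟨List.contains_iff_mem.mpr hx, hcon.1⟩, hAdig⟩, hcon.2⟩, hBfdig⟩
            unfold pvTryWH
            rw [pvSplitOn_eq]
            conv_lhs => rw [hdec]
            rw [pvSplitC_append _ _ _ hxa, pvSplitC_of_not_mem _ _ hxb]
            rcases hAorB with hA0 | hB0
            · simp [pvIntDigits?_eq, hA0]
            · simp [pvIntDigits?_eq, hB0]
        rw [htry]
      · rw [if_neg hguard]
  · -- no 'x' in the token: guard fails (and the token is invalid)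
    have hv : pvValidTok p = false := by
      unfold pvValidTok
      simp [List.contains_iff_mem, hx]
    rw [hv, if_neg (by simp), pvALoop]
    have : PySem.Chars.isIn ['x'] p = false := by
      rw [pvIsIn_singleton]
      simp [List.contains_iff_mem, hx]
    rw [if_neg (by simp [this])]

-- ===== B-side DFA lemmas =====
theorem pvBGo_dead (t : List Char) (cs : List Char) (w h : Int) (hu : '_' ∉ t) :
    pvBGo (t ++ '_' :: cs) 4 w h = pvBGo cs 0 0 0 := by
  induction t generalizing w h with
  | nil => simp [pvBGo]
  | cons c t ih =>
    have hc : ¬ c = '_' := fun h1 => hu (by simp [h1])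
    have hm : '_' ∉ t := fun hm => hu (List.mem_cons_of_mem _ hm)
    simp only [List.cons_append, pvBGo, hc, if_false]
    split_ifs <;> simp_all

theorem pvBGo_st3 (t : List Char) (cs : List Char) (w h : Int) (hu : '_' ∉ t) :
    pvBGo (t ++ '_' :: cs) 3 w h
      = if t.all PySem.Chars.isdigit then (pvVal h t, w) else pvBGo cs 0 0 0 := by
  induction t generalizing h with
  | nil => simp [pvBGo, pvVal]
  | cons c t ih =>
    have hc : ¬ c = '_' := fun h1 => hu (by simp [h1])
    have hm : '_' ∉ t := fun hm => hu (List.mem_cons_of_mem _ hm)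
    by_cases hd : PySem.Chars.isdigit c = true
    · have hbd : pvBDigit c = true := by
        simpa [PySem.Chars.isdigit, pvBDigit] using hd
      simp only [List.cons_append, pvBGo, hc, if_false, hbd]
      norm_num
      rw [ih _ hm]
      simp [hd, pvVal]
    · have hbd : pvBDigit c = false := by
        simpa [PySem.Chars.isdigit, pvBDigit] using hd
      simp only [List.cons_append, pvBGo, hc, if_false, hbd]
      norm_num
      rw [pvBGo_dead _ _ _ _ hm]
      simp [hd]

theorem pvBGo_st2 (t : List Char) (cs : List Char) (w h : Int) (hu : '_' ∉ t) :
    pvBGo (t ++ '_' :: cs) 2 w h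
      = if !t.isEmpty && t.all PySem.Chars.isdigit then (pvVal h t, w)
        else pvBGo cs 0 0 0 := by
  cases t with
  | nil => simp [pvBGo]
  | cons c t =>
    have hc : ¬ c = '_' := fun h1 => hu (by simp [h1])
    have hm : '_' ∉ t := fun hm => hu (List.mem_cons_of_mem _ hm)
    by_cases hd : PySem.Chars.isdigit c = true
    · have hbd : pvBDigit c = true := by
        simpa [PySem.Chars.isdigit, pvBDigit] using hd
      simp only [List.cons_append, pvBGo, hc, if_false, hbd]
      norm_num
      rw [pvBGo_st3 _ _ _ _ hm]
      simp [hd, pvVal]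
    · have hbd : pvBDigit c = false := by
        simpa [PySem.Chars.isdigit, pvBDigit] using hd
      simp only [List.cons_append, pvBGo, hc, if_false, hbd]
      norm_num
      rw [pvBGo_dead _ _ _ _ hm]
      simp [hd]

-- from state 1: accept iff the rest is digits* 'x' digits+
theorem pvBGo_st1 (t : List Char) (cs : List Char) (w h : Int) (hu : '_' ∉ t) :
    pvBGo (t ++ '_' :: cs) 1 w h
      = if t.contains 'x' && (pvTokA t).all PySem.Chars.isdigit
            && !(pvTokB t).isEmpty && (pvTokB t).all PySem.Chars.isdigit then
          (pvVal h (pvTokB t), pvVal w (pvTokA t))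
        else pvBGo cs 0 0 0 := by
  induction t generalizing w with
  | nil => simp [pvBGo]
  | cons c t ih =>
    have hc : ¬ c = '_' := fun h1 => hu (by simp [h1])
    have hm : '_' ∉ t := fun hm => hu (List.mem_cons_of_mem _ hm)
    by_cases hcx : c = 'x'
    · subst hcx
      have hbd : pvBDigit 'x' = false := by decide
      have hA : pvTokA ('x' :: t) = [] := by simp [pvTokA, List.takeWhile]
      have hB : pvTokB ('x' :: t) = t := by simp [pvTokB, List.dropWhile]
      have hequiv : (('x' :: t).contains 'x' && (pvTokA ('x' :: t)).all PySem.Chars.isdigit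
            && !(pvTokB ('x' :: t)).isEmpty && (pvTokB ('x' :: t)).all PySem.Chars.isdigit)
          = (!t.isEmpty && t.all PySem.Chars.isdigit) := by
        simp [hA, hB]
      rw [hequiv]
      conv_lhs => simp [pvBGo, hc, hbd]
      rw [pvBGo_st2 _ _ _ _ hm]
      split_ifs with h1
      · simp [hA, hB, pvVal]
      · rfl
    · have hxc : ¬ 'x' = c := fun hh => hcx hh.symm
      by_cases hd : PySem.Chars.isdigit c = true
      · have hbd : pvBDigit c = true := by
          simpa [PySem.Chars.isdigit, pvBDigit] using hd
        have hA : pvTokA (c :: t) = c :: pvTokA t := by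
          simp [pvTokA, List.takeWhile, hcx]
        have hB : pvTokB (c :: t) = pvTokB t := by
          simp [pvTokB, List.dropWhile, hcx]
        have hequiv : ((c :: t).contains 'x' && (pvTokA (c :: t)).all PySem.Chars.isdigit
              && !(pvTokB (c :: t)).isEmpty && (pvTokB (c :: t)).all PySem.Chars.isdigit)
            = (t.contains 'x' && (pvTokA t).all PySem.Chars.isdigit
              && !(pvTokB t).isEmpty && (pvTokB t).all PySem.Chars.isdigit) := by
          simp [hA, hB, hd, hxc]
        rw [hequiv]
        conv_lhs => simp [pvBGo, hc, hbd]
        rw [ih _ hm]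
        split_ifs with h1
        · simp [hA, hB, pvVal]
        · rfl
      · have hbd : pvBDigit c = false := by
          simpa [PySem.Chars.isdigit, pvBDigit] using hd
        have hA : pvTokA (c :: t) = c :: pvTokA t := by
          simp [pvTokA, List.takeWhile, hcx]
        have hcx' : (c == 'x') = false := by simp [hcx]
        have hcond : ((c :: t).contains 'x' && (pvTokA (c :: t)).all PySem.Chars.isdigit
              && !(pvTokB (c :: t)).isEmpty && (pvTokB (c :: t)).all PySem.Chars.isdigit)
            = false := by
          simp [hA, hd]
        rw [hcond]
        conv_lhs => simp [pvBGo, hc, hbd, hcx']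
        rw [pvBGo_dead _ _ _ _ hm]
        simp

-- B-side token step, matching pvAStep
theorem pvBStep (t : List Char) (cs : List Char) (hu : '_' ∉ t) :
    pvBGo (t ++ '_' :: cs) 0 0 0
      = if pvValidTok t then (pvVal 0 (pvTokB t), pvVal 0 (pvTokA t))
        else pvBGo cs 0 0 0 := by
  cases t with
  | nil => simp [pvBGo, pvValidTok]
  | cons c t =>
    have hc : ¬ c = '_' := fun h1 => hu (by simp [h1])
    have hm : '_' ∉ t := fun hmm => hu (List.mem_cons_of_mem _ hmm)
    by_cases hd : PySem.Chars.isdigit c = true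
    · have hbd : pvBDigit c = true := by
        simpa [PySem.Chars.isdigit, pvBDigit] using hd
      have hcx : c ≠ 'x' := pvDigit_ne_x hd
      have hxc : ¬ 'x' = c := fun hh => hcx hh.symm
      have hA : pvTokA (c :: t) = c :: pvTokA t := by
        simp [pvTokA, List.takeWhile, hcx]
      have hB : pvTokB (c :: t) = pvTokB t := by
        simp [pvTokB, List.dropWhile, hcx]
      have hequiv : pvValidTok (c :: t)
          = (t.contains 'x' && (pvTokA t).all PySem.Chars.isdigit
            && !(pvTokB t).isEmpty && (pvTokB t).all PySem.Chars.isdigit) := by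
        unfold pvValidTok
        simp [hA, hB, hd, hxc]
      rw [hequiv]
      conv_lhs => simp [pvBGo, hc, hbd]
      rw [pvBGo_st1 _ _ _ _ hm]
      split_ifs with h1
      · simp [hA, hB, pvVal]
      · rfl
    · -- first char not a digit: the token cannot be valid
      have hbd : pvBDigit c = false := by
        simpa [PySem.Chars.isdigit, pvBDigit] using hd
      have hv : pvValidTok (c :: t) = false := by
        unfold pvValidTok
        by_cases hcx : c = 'x'
        · subst hcx
          simp [pvTokA, List.takeWhile]
        · have hA : pvTokA (c :: t) = c :: pvTokA t := by
            simp [pvTokA, List.takeWhile, hcx]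
          simp [hA, hd]
      rw [hv]
      by_cases hcx : c = 'x'
      · subst hcx
        conv_lhs => simp [pvBGo, hc, hbd]
        rw [pvBGo_dead _ _ _ _ hm]
        simp
      · have hcx' : (c == 'x') = false := by simp [hcx]
        conv_lhs => simp [pvBGo, hc, hbd, hcx']
        rw [pvBGo_dead _ _ _ _ hm]
        simp

-- ===== main induction over the '_'-separated tokens =====
theorem pvMain (s : List Char) :
    pvALoop (pvSplitC '_' s) = pvBGo (s ++ ['_']) 0 0 0 := by
  induction hn : s.length using Nat.strong_induction_on generalizing s with
  | _ n ih =>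
    by_cases hu : '_' ∈ s
    · have hdec := pvFirstSplit '_' s hu
      set t := s.takeWhile (· ≠ '_') with ht
      set r := (s.dropWhile (· ≠ '_')).tail with hr
      have hxt : '_' ∉ t := by
        intro hmem
        have := List.mem_takeWhile_imp hmem
        simp at this
      have hlen : r.length < n := by
        have := congrArg List.length hdec
        simp at this
        omega
      conv_lhs => rw [hdec]
      rw [pvSplitC_append _ _ _ hxt]
      rw [pvAStep]
      conv_rhs => rw [hdec]
      rw [List.append_assoc, List.cons_append, pvBStep _ _ hxt]
      rw [ih r.length (by omega) r rfl]
    · rw [pvSplitC_of_not_mem _ _ hu]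
      rw [pvAStep]
      rw [pvBStep _ _ hu]
      simp [pvALoop, pvBGo]

-- ===== VERDICT (by name: the statement is the Claim_ definition above) =====
theorem parse_resolution_py_spec : Claim_equal_parse_resolution_py := by
  intro name _
  unfold Spec_parse_resolution_py parse_resolution_py parse_resolution_py_alt
  rw [pvSplitOn_eq]
  exact pvMain name.toList
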